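-- pv_equiv track=rewrite | github.com/TomG22/CS | preps/prep21.py | two_words
-- ===== SOURCE A (Python) =====
-- def two_words(string_list):
-- 	least = "z"
-- 	greatest = "A"
-- 	for word in string_list:
-- 		if word > greatest:
-- 			greatest = word
-- 		if word < least:
-- 			least = word
-- 	return least + " " + greatest
-- ===== SOURCE B (Python) =====
-- def two_words(string_list):
--     least = sorted(["z", *string_list])[0]
--     greatest = sorted([*string_list, "A"], reverse=True)[0]
--     return least + " " + greatest
-- ===== Notes on version B (the rewrite author's own statement) =====
-- stated objective: alternative
-- what changed: Replaces A's single accumulation loop with sort-then-index: sort the sentinel-extended list ascending and take the first element for the least, sort descending and take the first for the greatest.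
import Mathlib
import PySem

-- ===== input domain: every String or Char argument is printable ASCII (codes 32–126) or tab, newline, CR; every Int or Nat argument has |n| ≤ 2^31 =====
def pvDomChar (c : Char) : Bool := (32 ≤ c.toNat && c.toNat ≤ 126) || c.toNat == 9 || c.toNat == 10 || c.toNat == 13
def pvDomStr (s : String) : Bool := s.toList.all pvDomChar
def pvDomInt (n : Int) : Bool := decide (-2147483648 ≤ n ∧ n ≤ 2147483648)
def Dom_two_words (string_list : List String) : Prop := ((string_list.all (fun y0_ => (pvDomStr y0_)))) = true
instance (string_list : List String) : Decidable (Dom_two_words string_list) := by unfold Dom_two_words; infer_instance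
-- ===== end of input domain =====

-- B replaces A's manual accumulation loop with sort-then-index over sentinel-extended
-- lists (ascending sort's head = least, descending sort's head = greatest); objective: alternative.

-- ===== PORT A =====
def two_words (string_list : List String) : String :=
  let p := string_list.foldl
    (fun (s : String × String) word =>
      let greatest := if s.2 < word then word else s.2
      let least := if word < s.1 then word else s.1
      (least, greatest)) ("z", "A")
  p.1 ++ " " ++ p.2

-- ===== PORT B =====
def two_words_alt (string_list : List String) : String :=
  let least := (PySem.List.pyGet? (PySem.List.sorted ("z" :: string_list) (fun s => s) false) 0).getD ""
  let greatest := (PySem.List.pyGet? (PySem.List.sorted (string_list ++ ["A"]) (fun s => s) true) 0).getD ""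
  least ++ " " ++ greatest

-- ===== PRECONDITION & SPEC =====
def Spec_two_words (string_list : List String) (out : String) : Prop := out = two_words_alt string_list
instance (string_list : List String) (out : String) : Decidable (Spec_two_words string_list out) := by unfold Spec_two_words; infer_instance

-- ===== CLAIM =====
def Claim_equal_two_words : Prop := ∀ (string_list : List String), Dom_two_words string_list → Spec_two_words string_list (two_words string_list)

-- ===== LEMMAS AND PROOFS =====

theorem pv_step_min (c w : String) : (if w < c then w else c) = min c w := by
  by_cases h : w < c
  · simp [h, min_eq_right (le_of_lt h)]
  · simp [h, min_eq_left (not_lt.mp h)]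

theorem pv_step_max (c w : String) : (if c < w then w else c) = max c w := by
  by_cases h : c < w
  · simp [h, max_eq_right (le_of_lt h)]
  · simp [h, max_eq_left (not_lt.mp h)]

theorem pv_pair_fold (l : List String) (a b : String) :
    l.foldl (fun (s : String × String) word =>
      let greatest := if s.2 < word then word else s.2
      let least := if word < s.1 then word else s.1
      (least, greatest)) (a, b)
    = (l.foldl min a, l.foldl max b) := by
  have hf : (fun (s : String × String) word =>
      let greatest := if s.2 < word then word else s.2
      let least := if word < s.1 then word else s.1
      ((least, greatest) : String × String))
      = fun (s : String × String) w => (min s.1 w, max s.2 w) := by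
    funext s w
    show (if w < s.1 then w else s.1, if s.2 < w then w else s.2) = _
    rw [pv_step_min, pv_step_max]
  rw [hf]
  induction l generalizing a b with
  | nil => rfl
  | cons x t ih =>
      simp only [List.foldl_cons]
      exact ih _ _

theorem pv_foldl_min_mem (l : List String) (a : String) : l.foldl min a ∈ a :: l := by
  induction l generalizing a with
  | nil => simp
  | cons x t ih =>
      simp only [List.foldl_cons]
      rcases List.mem_cons.mp (ih (min a x)) with h | h
      · rcases min_choice a x with he | he <;> rw [h, he] <;> simp
      · simp [h]

theorem pv_foldl_min_le (l : List String) (a : String) :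
    ∀ y ∈ a :: l, l.foldl min a ≤ y := by
  induction l generalizing a with
  | nil => simp
  | cons x t ih =>
      intro y hy
      simp only [List.foldl_cons]
      rcases List.mem_cons.mp hy with h | hy'
      · rw [h]; exact le_trans (ih _ _ List.mem_cons_self) (min_le_left a x)
      · rcases List.mem_cons.mp hy' with h | h
        · rw [h]; exact le_trans (ih _ _ List.mem_cons_self) (min_le_right a x)
        · exact ih _ _ (List.mem_cons_of_mem _ h)

theorem pv_foldl_max_mem (l : List String) (a : String) : l.foldl max a ∈ a :: l := by
  induction l generalizing a with
  | nil => simp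
  | cons x t ih =>
      simp only [List.foldl_cons]
      rcases List.mem_cons.mp (ih (max a x)) with h | h
      · rcases max_choice a x with he | he <;> rw [h, he] <;> simp
      · simp [h]

theorem pv_foldl_max_ge (l : List String) (a : String) :
    ∀ y ∈ a :: l, y ≤ l.foldl max a := by
  induction l generalizing a with
  | nil => simp
  | cons x t ih =>
      intro y hy
      simp only [List.foldl_cons]
      rcases List.mem_cons.mp hy with h | hy'
      · rw [h]; exact le_trans (le_max_left a x) (ih _ _ List.mem_cons_self)
      · rcases List.mem_cons.mp hy' with h | h
        · rw [h]; exact le_trans (le_max_right a x) (ih _ _ List.mem_cons_self)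
        · exact ih _ _ (List.mem_cons_of_mem _ h)

-- ascending sort's head of ("z" :: l) is the running minimum seeded with "z"
theorem pv_least_side (l : List String) :
    (PySem.List.pyGet? (PySem.List.sorted ("z" :: l) (fun s => s) false) 0).getD ""
      = l.foldl min "z" := by
  obtain ⟨m, t, hs⟩ : ∃ m t, PySem.List.sorted ("z" :: l) (fun s => s) false = m :: t := by
    cases h : PySem.List.sorted ("z" :: l) (fun s => s) false with
    | nil => exact absurd ((PySem.List.sorted_eq_nil_iff _ _ _).mp h) (by simp)
    | cons m t => exact ⟨m, t, rfl⟩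
  rw [hs]
  have hget : (PySem.List.pyGet? (m :: t) 0).getD "" = m := by
    simp [PySem.List.pyGet?, PySem.List.pyIdx?]
  rw [hget]
  have hmem : m ∈ ("z" :: l : List String) :=
    (PySem.List.mem_sorted _ _ _ _).mp (hs ▸ List.mem_cons_self)
  exact le_antisymm
    (PySem.List.key_head_sorted_le _ _ hs _ (pv_foldl_min_mem l "z"))
    (pv_foldl_min_le l "z" m hmem)

-- descending sort's head of (l ++ ["A"]) is the running maximum seeded with "A"
theorem pv_greatest_side (l : List String) :
    (PySem.List.pyGet? (PySem.List.sorted (l ++ ["A"]) (fun s => s) true) 0).getD ""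
      = l.foldl max "A" := by
  obtain ⟨m, t, hs⟩ : ∃ m t, PySem.List.sorted (l ++ ["A"]) (fun s => s) true = m :: t := by
    cases h : PySem.List.sorted (l ++ ["A"]) (fun s => s) true with
    | nil => exact absurd ((PySem.List.sorted_eq_nil_iff _ _ _).mp h) (by simp)
    | cons m t => exact ⟨m, t, rfl⟩
  rw [hs]
  have hget : (PySem.List.pyGet? (m :: t) 0).getD "" = m := by
    simp [PySem.List.pyGet?, PySem.List.pyIdx?]
  rw [hget]
  have hmem : m ∈ l ++ ["A"] :=
    (PySem.List.mem_sorted _ _ _ _).mp (hs ▸ List.mem_cons_self)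
  have hmem' : m ∈ ("A" :: l : List String) := by
    rcases List.mem_append.mp hmem with h | h
    · exact List.mem_cons_of_mem _ h
    · simp at h; simp [h]
  have hfold_mem : l.foldl max "A" ∈ l ++ ["A"] := by
    rcases List.mem_cons.mp (pv_foldl_max_mem l "A") with h | h
    · simp [h]
    · exact List.mem_append_left _ h
  exact le_antisymm
    (pv_foldl_max_ge l "A" m hmem')
    (PySem.List.key_head_sorted_rev_ge _ _ hs _ hfold_mem)

-- ===== VERDICT =====
theorem two_words_spec : Claim_equal_two_words := by
  intro l _
  show two_words l = two_words_alt l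
  simp only [two_words, two_words_alt, pv_pair_fold, pv_least_side, pv_greatest_side]
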